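-- pv_equiv track=rewrite | github.com/patrapritam/ResumeAI | nlp-service/app/matchers/matching_engine.py | get_highest_level
-- ===== SOURCE A (Python) =====
-- from typing import Dict, List, Set, Tuple
--
-- def get_highest_level(keywords: List[str], level_hierarchy: Dict[str, int]) -> int:
--     """Get highest experience level from keywords"""
--     max_level = None
--     for keyword in keywords:
--         keyword_lower = keyword.lower()
--         for level_name, level_value in level_hierarchy.items():
--             if level_name in keyword_lower:
--                 if max_level is None or level_value > max_level:
--                     max_level = level_value
--     return max_level
-- ===== SOURCE B (Python) =====
-- def get_highest_level(keywords, level_hierarchy):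
--     """Get highest experience level from keywords"""
--     lowered = [k.lower() for k in keywords]
--     for name, value in sorted(level_hierarchy.items(), key=lambda item: item[1], reverse=True):
--         if any(name in kw for kw in lowered):
--             return value
--     return None
-- ===== Notes on version B (the rewrite author's own statement) =====
-- stated objective: faster
-- what changed: Instead of scanning all keyword x level pairs while tracking a running maximum, B lowercases the keywords once, sorts the hierarchy items by value descending, and returns on the first level name that is a substring of any lowered keyword (early exit), so it usually avoids testing most pairs.
import Mathlib
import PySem

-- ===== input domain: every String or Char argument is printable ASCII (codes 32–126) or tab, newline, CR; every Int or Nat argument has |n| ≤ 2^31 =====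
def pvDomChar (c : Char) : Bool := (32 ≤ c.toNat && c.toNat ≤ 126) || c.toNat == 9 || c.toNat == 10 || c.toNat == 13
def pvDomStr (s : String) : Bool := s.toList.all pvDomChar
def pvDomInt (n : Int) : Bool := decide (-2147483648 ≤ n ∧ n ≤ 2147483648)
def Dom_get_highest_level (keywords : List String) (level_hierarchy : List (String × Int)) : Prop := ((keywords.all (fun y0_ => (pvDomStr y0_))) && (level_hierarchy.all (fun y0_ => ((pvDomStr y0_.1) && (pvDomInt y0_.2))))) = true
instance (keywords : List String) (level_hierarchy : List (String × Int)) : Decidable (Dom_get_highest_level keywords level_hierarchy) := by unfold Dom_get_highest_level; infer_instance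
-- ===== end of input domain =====

-- B is an alternative decomposition: sort the hierarchy by value descending and return the
-- first level name occurring in any lowered keyword, instead of A's running maximum over all pairs.

-- ===== PORT A =====
-- 'if max_level is None or level_value > max_level: max_level = level_value', as a helper
def ghlStep (acc : Option Int) (v : Int) : Option Int :=
  match acc with
  | none => some v
  | some m => if v > m then some v else some m

def get_highest_level (keywords : List String) (level_hierarchy : List (String × Int)) : Option Int :=
  keywords.foldl (fun maxLevel keyword =>
    let keywordLower := PySem.Str.lower keyword
    level_hierarchy.foldl (fun acc p =>
      if PySem.Str.isIn p.1 keywordLower then ghlStep acc p.2 else acc) maxLevel) none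

-- ===== PORT B =====
-- the 'for … in sorted(…): if any(…): return value' loop, with its early return
def ghlFind (lowered : List String) : List (String × Int) → Option Int
  | [] => none
  | p :: rest =>
      if lowered.any (fun kw => PySem.Str.isIn p.1 kw) then some p.2
      else ghlFind lowered rest

def get_highest_level_alt (keywords : List String) (level_hierarchy : List (String × Int)) : Option Int :=
  ghlFind (keywords.map (fun k => PySem.Str.lower k))
    (PySem.List.sorted level_hierarchy (fun p => p.2) true)

-- ===== PRECONDITION & SPEC =====
def Spec_get_highest_level (keywords : List String) (level_hierarchy : List (String × Int)) (out : Option Int) : Prop := out = get_highest_level_alt keywords level_hierarchy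
instance (keywords : List String) (level_hierarchy : List (String × Int)) (out : Option Int) : Decidable (Spec_get_highest_level keywords level_hierarchy out) := by unfold Spec_get_highest_level; infer_instance

-- ===== CLAIM (what is proved, stated in full; the proofs are below) =====
def Claim_equal_get_highest_level : Prop := ∀ (keywords : List String) (level_hierarchy : List (String × Int)), Dom_get_highest_level keywords level_hierarchy → Spec_get_highest_level keywords level_hierarchy (get_highest_level keywords level_hierarchy)

-- ===== LEMMAS AND PROOFS =====

-- A's inner loop is a ghlStep-fold over the values of the matching pairs
theorem ghl_inner_eq (kl : String) (lh : List (String × Int)) (acc : Option Int) :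
    lh.foldl (fun acc p => if PySem.Str.isIn p.1 kl then ghlStep acc p.2 else acc) acc
      = ((lh.filter (fun p => PySem.Str.isIn p.1 kl)).map (fun p => p.2)).foldl ghlStep acc := by
  induction lh generalizing acc with
  | nil => rfl
  | cons h t ih =>
      simp only [List.foldl_cons, List.filter_cons]
      by_cases hc : PySem.Str.isIn h.1 kl = true
      · rw [if_pos hc, if_pos hc, List.map_cons, List.foldl_cons, ih]
      · rw [if_neg hc, if_neg hc, ih]

-- a fold of folds is a fold over the flatMap
theorem foldl_foldl_flatMap {α β γ : Type} (f : α → List β) (g : γ → β → γ)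
    (ks : List α) (acc : γ) :
    ks.foldl (fun a k => (f k).foldl g a) acc = (ks.flatMap f).foldl g acc := by
  induction ks generalizing acc with
  | nil => rfl
  | cons h t ih => simp [List.flatMap_cons, List.foldl_append, ih]

theorem ghlStep_eq_max (m v : Int) : ghlStep (some m) v = some (max m v) := by
  simp only [ghlStep]
  split_ifs with h
  · simp [max_eq_right (le_of_lt h)]
  · simp [max_eq_left (by omega : v ≤ m)]

theorem foldl_ghlStep_some (l : List Int) (m : Int) :
    l.foldl ghlStep (some m) = some (l.foldl max m) := by
  induction l generalizing m with
  | nil => rfl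
  | cons h t ih => simp [ghlStep_eq_max, ih]

theorem foldl_ghlStep_none_cons (v : Int) (t : List Int) :
    (v :: t).foldl ghlStep none = some (t.foldl max v) := by
  simp [ghlStep, foldl_ghlStep_some]

theorem ghlFind_eq_none_iff (lowered : List String) (s : List (String × Int)) :
    ghlFind lowered s = none ↔
      ∀ p ∈ s, lowered.any (fun kw => PySem.Str.isIn p.1 kw) = false := by
  induction s with
  | nil => simp [ghlFind]
  | cons h t ih =>
      by_cases hc : lowered.any (fun kw => PySem.Str.isIn h.1 kw) = true
      · simp only [ghlFind, hc, if_true]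
        constructor
        · intro h0; exact absurd h0 (by simp)
        · intro hall
          have := hall h List.mem_cons_self
          rw [hc] at this
          exact absurd this (by simp)
      · simp only [ghlFind, hc]
        rw [if_neg (by simp), ih]
        constructor
        · intro hall p hp
          rcases List.mem_cons.mp hp with rfl | hp
          · exact Bool.eq_false_iff.mpr hc
          · exact hall p hp
        · intro hall p hp
          exact hall p (List.mem_cons_of_mem _ hp)

theorem ghlFind_eq_some (lowered : List String) (s : List (String × Int))
    (hp : s.Pairwise (fun a b => b.2 ≤ a.2)) (m : Int)
    (h : ghlFind lowered s = some m) :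
    (∃ p ∈ s, lowered.any (fun kw => PySem.Str.isIn p.1 kw) = true ∧ p.2 = m) ∧
      ∀ q ∈ s, lowered.any (fun kw => PySem.Str.isIn q.1 kw) = true → q.2 ≤ m := by
  induction s with
  | nil => simp [ghlFind] at h
  | cons hd t ih =>
      rcases List.pairwise_cons.mp hp with ⟨hle, hpt⟩
      by_cases hc : lowered.any (fun kw => PySem.Str.isIn hd.1 kw) = true
      · simp only [ghlFind, hc, if_true, Option.some.injEq] at h
        subst h
        refine ⟨⟨hd, by simp, hc, rfl⟩, ?_⟩
        intro q hq _
        rcases List.mem_cons.mp hq with rfl | hq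
        · exact le_refl _
        · exact hle q hq
      · simp only [ghlFind, hc] at h
        rcases ih hpt h with ⟨⟨p, hpm, hpa, hpv⟩, hmax⟩
        refine ⟨⟨p, List.mem_cons_of_mem _ hpm, hpa, hpv⟩, ?_⟩
        intro q hq hqa
        rcases List.mem_cons.mp hq with rfl | hq
        · exact absurd hqa hc
        · exact hmax q hq hqa

-- the matched-values list A folds over
def ghlL (keywords : List String) (lh : List (String × Int)) : List Int :=
  keywords.flatMap (fun kw =>
    (lh.filter (fun p => PySem.Str.isIn p.1 (PySem.Str.lower kw))).map (fun p => p.2))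

theorem ghl_A_eq (keywords : List String) (lh : List (String × Int)) :
    get_highest_level keywords lh = (ghlL keywords lh).foldl ghlStep none := by
  unfold get_highest_level ghlL
  rw [← foldl_foldl_flatMap]
  simp only [ghl_inner_eq]

theorem mem_ghlL (keywords : List String) (lh : List (String × Int)) (x : Int) :
    x ∈ ghlL keywords lh ↔
      ∃ p ∈ lh, (∃ kw ∈ keywords, PySem.Str.isIn p.1 (PySem.Str.lower kw) = true) ∧ p.2 = x := by
  unfold ghlL
  simp only [List.mem_flatMap, List.mem_map, List.mem_filter]
  constructor
  · rintro ⟨kw, hkw, p, ⟨hpl, hpi⟩, hpx⟩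
    exact ⟨p, hpl, ⟨kw, hkw, hpi⟩, hpx⟩
  · rintro ⟨p, hpl, ⟨kw, hkw, hpi⟩, hpx⟩
    exact ⟨kw, hkw, p, ⟨hpl, hpi⟩, hpx⟩

-- B's per-pair condition equals A's, quantified over keywords
theorem ghl_any_lower (keywords : List String) (n : String) :
    (keywords.map (fun k => PySem.Str.lower k)).any (fun kw => PySem.Str.isIn n kw)
      = keywords.any (fun kw => PySem.Str.isIn n (PySem.Str.lower kw)) := by
  simp only [List.any_map, Function.comp_def, PySem.Str.isIn, PySem.Str.lower]

theorem ghl_main (keywords : List String) (lh : List (String × Int)) :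
    get_highest_level keywords lh = get_highest_level_alt keywords lh := by
  rw [ghl_A_eq]
  unfold get_highest_level_alt
  set s := PySem.List.sorted lh (fun p => p.2) true with hs
  have hsp : s.Pairwise (fun a b => b.2 ≤ a.2) := PySem.List.sorted_pairwise_rev lh _
  have hmem : ∀ p : String × Int, p ∈ s ↔ p ∈ lh := fun p => PySem.List.mem_sorted lh (fun p => p.2) true p
  cases hL : ghlL keywords lh with
  | nil =>
      simp only [List.foldl_nil]
      symm
      rw [ghlFind_eq_none_iff]
      intro p hp
      rw [ghl_any_lower]
      by_contra hany
      simp only [Bool.not_eq_false, List.any_eq_true] at hany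
      rcases hany with ⟨kw, hkw, hin⟩
      have : p.2 ∈ ghlL keywords lh :=
        (mem_ghlL keywords lh p.2).mpr ⟨p, (hmem p).mp hp, ⟨kw, hkw, hin⟩, rfl⟩
      rw [hL] at this
      exact absurd this (List.not_mem_nil)
  | cons v t =>
      rw [foldl_ghlStep_none_cons]
      set m := t.foldl max v with hm
      -- m is a matched value, and bounds all matched values
      have hmemL : m ∈ v :: t := by
        rcases PySem.List.foldl_max_mem t v with h | h
        · rw [← hm] at h; rw [h]; exact List.mem_cons_self
        · rw [← hm] at h; exact List.mem_cons_of_mem _ h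
      have hmL : m ∈ ghlL keywords lh := by rw [hL]; exact hmemL
      have hbound : ∀ x ∈ ghlL keywords lh, x ≤ m := by
        intro x hx
        rw [hL] at hx
        rcases List.mem_cons.mp hx with hx | hx
        · rw [hx]; exact (PySem.List.le_foldl_max t v).1
        · exact (PySem.List.le_foldl_max t v).2 x hx
      rcases (mem_ghlL keywords lh m).mp hmL with ⟨p, hpl, ⟨kw, hkw, hin⟩, hpv⟩
      -- B cannot return none: p is in s and matches
      cases hB : ghlFind (keywords.map (fun k => PySem.Str.lower k)) s with
      | none =>
          have := (ghlFind_eq_none_iff _ _).mp hB p ((hmem p).mpr hpl)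
          rw [ghl_any_lower] at this
          have : keywords.any (fun kw => PySem.Str.isIn p.1 (PySem.Str.lower kw)) = true :=
            List.any_eq_true.mpr ⟨kw, hkw, hin⟩
          simp_all
      | some m' =>
          rcases ghlFind_eq_some _ _ hsp m' hB with ⟨⟨q, hqs, hqa, hqv⟩, hmax⟩
          -- m' is a matched value, hence m' ≤ m
          have hm'L : m' ∈ ghlL keywords lh := by
            rw [ghl_any_lower] at hqa
            rcases List.any_eq_true.mp hqa with ⟨kw', hkw', hin'⟩
            exact (mem_ghlL keywords lh m').mpr ⟨q, (hmem q).mp hqs, ⟨kw', hkw', hin'⟩, hqv⟩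
          -- p matches, p ∈ s, so p.2 = m ≤ m'
          have hle : m ≤ m' := by
            rw [← hpv]
            refine hmax p ((hmem p).mpr hpl) ?_
            rw [ghl_any_lower]
            exact List.any_eq_true.mpr ⟨kw, hkw, hin⟩
          have : m = m' := le_antisymm hle (hbound m' hm'L)
          rw [this]

-- ===== VERDICT (by name: the statement is the Claim_ definition above) =====
theorem get_highest_level_spec : Claim_equal_get_highest_level := by
  intro keywords lh _
  unfold Spec_get_highest_level
  exact ghl_main keywords lh
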